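-- pv_equiv track=rewrite | github.com/dannyxn/Graphs-Toolbox | converters/type_conversions.py | convert_adj_matrix_to_graph_seq
-- ===== SOURCE A (Python) =====
-- def convert_adj_matrix_to_graph_seq(adjacency_matrix: list) -> list:
--     """
--         convert_adj_matrix_to_graph_seq method generates
--         graphic sequence based on adjacency matrix
--     """
--     graph_seq = [0 for _ in range(len(adjacency_matrix))]
--     for i in range(len(adjacency_matrix)):
--         for j in range(len(adjacency_matrix[i])):
--             if adjacency_matrix[i][j] == 1:
--                 graph_seq[i] += 1
--
--     graph_seq.sort()
--     graph_seq = graph_seq[::-1]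
--     return graph_seq
-- ===== SOURCE B (Python) =====
-- def convert_adj_matrix_to_graph_seq(adjacency_matrix: list) -> list:
--     """Degree sequence via per-row tally of 1-cells, sorted descending by a counting (bucket) sort."""
--     degrees = [row.count(1) for row in adjacency_matrix]
--     if not degrees:
--         return []
--     counts = [0] * (max(degrees) + 1)
--     for d in degrees:
--         counts[d] += 1
--     result = []
--     for d in range(len(counts) - 1, -1, -1):
--         result.extend([d] * counts[d])
--     return result
-- ===== Notes on version B (the rewrite author's own statement) =====
-- stated objective: faster
-- what changed: Replaces the index-based nested tally plus comparison sort (list.sort then slice-reverse) with a per-row count(1) tally followed by a counting/bucket sort that emits degrees from the highest bucket down, removing the O(n log n) sorting stage.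
import Mathlib
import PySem

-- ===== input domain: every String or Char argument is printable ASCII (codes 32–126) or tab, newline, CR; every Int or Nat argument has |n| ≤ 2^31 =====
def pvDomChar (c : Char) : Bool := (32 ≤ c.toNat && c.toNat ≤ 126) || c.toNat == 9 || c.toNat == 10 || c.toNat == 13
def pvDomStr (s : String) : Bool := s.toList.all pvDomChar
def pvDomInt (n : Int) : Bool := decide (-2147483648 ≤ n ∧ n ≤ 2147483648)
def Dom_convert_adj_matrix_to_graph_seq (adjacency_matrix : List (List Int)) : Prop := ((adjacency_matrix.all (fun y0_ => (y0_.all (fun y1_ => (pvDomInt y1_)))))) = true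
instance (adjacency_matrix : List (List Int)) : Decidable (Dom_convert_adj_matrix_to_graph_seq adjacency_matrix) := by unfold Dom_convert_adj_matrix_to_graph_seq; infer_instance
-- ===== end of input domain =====

-- B replaces A's index-based tally plus comparison sort with a per-row count(1) tally and a
-- descending counting/bucket sort (alternative algorithm, same return value).

-- ===== PORT A =====
-- graph_seq = [0 for _ in range(len(m))]; nested index loops incrementing graph_seq[i] on cells == 1;
-- graph_seq.sort(); graph_seq = graph_seq[::-1]
def convert_adj_matrix_to_graph_seq (adjacency_matrix : List (List Int)) : List Int :=
  let n : Int := (adjacency_matrix.length : Int)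
  let graph_seq : List Int := (PySem.List.pyRange 0 n 1).map (fun _ => 0)
  let graph_seq :=
    (PySem.List.pyRange 0 n 1).foldl (fun gs i =>
      (PySem.List.pyRange 0 ((PySem.List.pyGetD adjacency_matrix i []).length : Int) 1).foldl
        (fun gs' j =>
          if PySem.List.pyGetD (PySem.List.pyGetD adjacency_matrix i []) j 0 = 1 then
            PySem.List.pySetD gs' i (PySem.List.pyGetD gs' i 0 + 1)
          else gs') gs) graph_seq
  let graph_seq := PySem.List.sorted graph_seq (fun x => x) false
  ((PySem.List.slice? graph_seq none none (-1)).getD [])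

-- ===== PORT B =====
-- degrees = [row.count(1) for row in m]; counting sort: counts[d] += 1; emit buckets high→low
def convert_adj_matrix_to_graph_seq_alt (adjacency_matrix : List (List Int)) : List Int :=
  let degrees : List Int := adjacency_matrix.map (fun row => (PySem.List.count row 1 : Int))
  if degrees = [] then []
  else
    let mx : Int := ((PySem.List.max? degrees (fun x => x)).getD 0)
    let counts : List Int := List.replicate (mx + 1).toNat 0
    let counts := degrees.foldl
      (fun cs d => PySem.List.pySetD cs d (PySem.List.pyGetD cs d 0 + 1)) counts
    (PySem.List.pyRange ((counts.length : Int) - 1) (-1) (-1)).foldl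
      (fun out d => out ++ List.replicate (PySem.List.pyGetD counts d 0).toNat d) []

-- ===== PRECONDITION & SPEC =====
def Spec_convert_adj_matrix_to_graph_seq (adjacency_matrix : List (List Int)) (out : List Int) : Prop := out = convert_adj_matrix_to_graph_seq_alt adjacency_matrix
instance (adjacency_matrix : List (List Int)) (out : List Int) : Decidable (Spec_convert_adj_matrix_to_graph_seq adjacency_matrix out) := by unfold Spec_convert_adj_matrix_to_graph_seq; infer_instance

-- ===== CLAIM (what is proved, stated in full; the proofs are below) =====
def Claim_equal_convert_adj_matrix_to_graph_seq : Prop := ∀ (adjacency_matrix : List (List Int)), Dom_convert_adj_matrix_to_graph_seq adjacency_matrix → Spec_convert_adj_matrix_to_graph_seq adjacency_matrix (convert_adj_matrix_to_graph_seq adjacency_matrix)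

-- ===== LEMMAS AND PROOFS =====

lemma pv_getD_set (l : List Int) (i j : Nat) (v : Int) :
    (l.set i v).getD j 0 = if j = i ∧ j < l.length then v else l.getD j 0 := by
  simp [List.getD_eq_getElem?_getD, List.getElem?_set]
  split_ifs with h1 h2 h3 h4 <;> simp_all <;> omega

lemma pv_set_getD_self (gs : List Int) (i : Nat) : gs.set i (gs.getD i 0) = gs := by
  by_cases h : i < gs.length
  · rw [List.getD_eq_getElem _ _ h, List.set_getElem_self]
  · rw [List.set_eq_of_length_le (by omega)]

lemma pv_inner_count (i : Nat) : ∀ (row gs : List Int),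
    row.foldl (fun g x => if x = 1 then PySem.List.pySetD g (i : Int) (PySem.List.pyGetD g (i : Int) 0 + 1) else g) gs
      = gs.set i (gs.getD i 0 + (PySem.List.count row 1 : Int)) := by
  intro row
  induction row with
  | nil =>
    intro gs
    simp only [List.foldl_nil, PySem.List.count]
    simpa using (pv_set_getD_self gs i).symm
  | cons x row ih =>
    intro gs
    simp only [List.foldl_cons]
    by_cases hx : x = 1
    · rw [if_pos hx, ih, PySem.List.pySetD_natCast, PySem.List.pyGetD_natCast, pv_getD_set]
      by_cases h : i < gs.length
      · rw [if_pos (⟨rfl, h⟩ : i = i ∧ i < gs.length), List.set_set]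
        congr 1
        simp [PySem.List.count_eq, hx]
        ring
      · have hle : gs.length ≤ i := by omega
        rw [if_neg (by tauto)]
        simp [List.set_eq_of_length_le hle]
    · rw [if_neg hx, ih]
      congr 2
      simp [PySem.List.count_eq, List.count_cons]
      intro h; exact absurd h hx

lemma pv_fold_set (c : Nat → Int) : ∀ (is : List Nat) (gs : List Int), is.Nodup →
    ((is.foldl (fun g i => g.set i (g.getD i 0 + c i)) gs).length = gs.length ∧
     ∀ j, (is.foldl (fun g i => g.set i (g.getD i 0 + c i)) gs).getD j 0
            = if j ∈ is ∧ j < gs.length then gs.getD j 0 + c j else gs.getD j 0) := by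
  intro is
  induction is with
  | nil => intro gs _; simp
  | cons i is ih =>
    intro gs hnd
    obtain ⟨hmem, hnd⟩ := List.nodup_cons.mp hnd
    simp only [List.foldl_cons]
    obtain ⟨hlen, hget⟩ := ih (gs.set i (gs.getD i 0 + c i)) hnd
    refine ⟨by simpa using hlen, ?_⟩
    intro j
    rw [hget j]
    simp only [List.length_set, List.mem_cons]
    rw [pv_getD_set]
    clear hget hlen ih
    by_cases hji : j = i
    · subst hji
      rw [if_neg (fun h => hmem h.1)]
      by_cases hl : j < gs.length
      · rw [if_pos ⟨rfl, hl⟩, if_pos ⟨Or.inl rfl, hl⟩]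
      · rw [if_neg (fun h => hl h.2), if_neg (fun h => hl h.2)]
    · by_cases hl : j < gs.length
      · by_cases hjs : j ∈ is
        · rw [if_pos ⟨hjs, hl⟩, if_neg (fun h => hji h.1), if_pos ⟨Or.inr hjs, hl⟩]
        · rw [if_neg (fun h => hjs h.1), if_neg (fun h => hji h.1), if_neg (fun h => h.1.elim hji hjs)]
      · rw [if_neg (fun h => hl h.2), if_neg (fun h => hl h.2), if_neg (fun h => hl h.2)]

lemma pv_tally (m : List (List Int)) :
    ((PySem.List.pyRange 0 (m.length : Int) 1).foldl (fun gs i =>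
      (PySem.List.pyRange 0 ((PySem.List.pyGetD m i []).length : Int) 1).foldl
        (fun gs' j =>
          if PySem.List.pyGetD (PySem.List.pyGetD m i []) j 0 = 1 then
            PySem.List.pySetD gs' i (PySem.List.pyGetD gs' i 0 + 1)
          else gs') gs) ((PySem.List.pyRange 0 (m.length : Int) 1).map (fun _ => 0)))
    = m.map (fun row => (PySem.List.count row 1 : Int)) := by
  rw [PySem.List.pyRange_zero_nat, List.foldl_map, List.map_map]
  have hinit : (List.range m.length).map ((fun _ => (0:Int)) ∘ (fun k : Nat => (k:Int)))
      = List.replicate m.length 0 := by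
    simp [Function.comp_def]
  rw [hinit]
  have hbody : ∀ (gs : List Int), ∀ i ∈ List.range m.length,
      ((PySem.List.pyRange 0 ((PySem.List.pyGetD m (i:Int) []).length : Int) 1).foldl
        (fun gs' j =>
          if PySem.List.pyGetD (PySem.List.pyGetD m (i:Int) []) j 0 = 1 then
            PySem.List.pySetD gs' (i:Int) (PySem.List.pyGetD gs' (i:Int) 0 + 1)
          else gs') gs)
      = gs.set i (gs.getD i 0 + (PySem.List.count (m.getD i []) 1 : Int)) := by
    intro gs i hi
    rw [PySem.List.pyGetD_natCast]
    rw [PySem.List.foldl_pyRange_pyGetD' (m.getD i []) 0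
        (fun gs' x => if x = 1 then PySem.List.pySetD gs' (i:Int) (PySem.List.pyGetD gs' (i:Int) 0 + 1) else gs')
        gs (le_refl 0)]
    simp only [Int.toNat_zero, List.drop_zero]
    exact pv_inner_count i (m.getD i []) gs
  rw [PySem.List.foldl_congr_mem _ _ _ _ hbody]
  obtain ⟨hlen, hget⟩ := pv_fold_set (fun i => (PySem.List.count (m.getD i []) 1 : Int))
      (List.range m.length) (List.replicate m.length 0) (List.nodup_range)
  apply List.ext_getElem (by rw [hlen]; simp)
  intro j hj hj'
  have hjm : j < m.length := by simpa using hj'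
  rw [← List.getD_eq_getElem _ 0 hj, hget j]
  simp [hjm]

lemma pv_counts (ds : List Int) : ∀ (cs : List Int), (∀ d ∈ ds, 0 ≤ d ∧ d < (cs.length : Int)) →
    ((ds.foldl (fun cs d => PySem.List.pySetD cs d (PySem.List.pyGetD cs d 0 + 1)) cs).length = cs.length ∧
     ∀ v : Int, 0 ≤ v → v < (cs.length : Int) →
       PySem.List.pyGetD (ds.foldl (fun cs d => PySem.List.pySetD cs d (PySem.List.pyGetD cs d 0 + 1)) cs) v 0
         = PySem.List.pyGetD cs v 0 + (ds.count v : Int)) := by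
  induction ds with
  | nil => intro cs _; simp
  | cons d ds ih =>
    intro cs hb
    obtain ⟨hd0, hdl⟩ := hb d List.mem_cons_self
    have hb' : ∀ e ∈ ds, 0 ≤ e ∧ e < (cs.length : Int) := fun e he => hb e (List.mem_cons_of_mem d he)
    simp only [List.foldl_cons]
    rw [PySem.List.pySetD_of_nonneg _ _ hd0]
    obtain ⟨hlen, hget⟩ := ih (cs.set d.toNat (PySem.List.pyGetD cs d 0 + 1))
      (by intro e he; simpa using hb' e he)
    refine ⟨by simpa using hlen, ?_⟩
    intro v hv0 hvl
    rw [hget v hv0 (by simpa using hvl)]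
    have hL : PySem.List.pyGetD (cs.set d.toNat (PySem.List.pyGetD cs d 0 + 1)) v 0
        = if v = d then PySem.List.pyGetD cs v 0 + 1 else PySem.List.pyGetD cs v 0 := by
      rw [PySem.List.pyGetD_of_nonneg _ _ hv0, pv_getD_set]
      by_cases hvd : v = d
      · subst hvd
        rw [if_pos ⟨rfl, by omega⟩, if_pos rfl, PySem.List.pyGetD_of_nonneg _ _ hv0]
      · rw [if_neg (by intro h; exact hvd (by omega)), if_neg hvd, PySem.List.pyGetD_of_nonneg _ _ hv0]
    rw [hL]
    by_cases hvd : v = d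
    · subst hvd
      simp
      ring
    · simp [Ne.symm hvd]
      exact hvd

lemma pv_flatMap_count {ds : List Int} (hnd : ds.Nodup) (c : Int → Nat) (v : Int) :
    (ds.flatMap (fun d => List.replicate (c d) d)).count v = if v ∈ ds then c v else 0 := by
  induction ds with
  | nil => simp
  | cons d ds ih =>
    obtain ⟨hmem, hnd⟩ := List.nodup_cons.mp hnd
    simp only [List.flatMap_cons, List.count_append, List.count_replicate, ih hnd, List.mem_cons]
    by_cases hvd : v = d
    · subst hvd
      simp [hmem]
    · simp [hvd, Ne.symm hvd]

lemma pv_flatMap_pairwise {ds : List Int} (hd : ds.Pairwise (· > ·)) (c : Int → Nat) :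
    (ds.flatMap (fun d => List.replicate (c d) d)).Pairwise (fun a b => b ≤ a) := by
  induction ds with
  | nil => simp
  | cons d ds ih =>
    obtain ⟨hgt, hd⟩ := List.pairwise_cons.mp hd
    simp only [List.flatMap_cons]
    rw [List.pairwise_append]
    refine ⟨List.pairwise_replicate.mpr (by simp), ih hd, ?_⟩
    intro x hx y hy
    obtain ⟨e, he, hye⟩ := List.mem_flatMap.mp hy
    rw [(List.eq_of_mem_replicate hx), (List.eq_of_mem_replicate hye)]
    exact le_of_lt (hgt e he)

theorem pv_main (m : List (List Int)) :
    convert_adj_matrix_to_graph_seq m = convert_adj_matrix_to_graph_seq_alt m := by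
  have hA : convert_adj_matrix_to_graph_seq m
      = (PySem.List.sorted (m.map (fun row => (PySem.List.count row 1 : Int))) (fun x => x) false).reverse := by
    simp only [convert_adj_matrix_to_graph_seq]
    rw [pv_tally m, PySem.List.slice?_none_none_neg_one, Option.getD_some]
  by_cases hm : m = []
  · subst hm; simp [hA, convert_adj_matrix_to_graph_seq_alt, PySem.List.sorted]
  · set degs : List Int := m.map (fun row => (PySem.List.count row 1 : Int)) with hdegs
    have hne : degs ≠ [] := by simpa [hdegs] using hm
    have hdnn : ∀ d ∈ degs, 0 ≤ d := by
      intro d hd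
      obtain ⟨row, _, rfl⟩ := List.mem_map.mp hd
      positivity
    cases hmx : PySem.List.max? degs (fun x => x) with
    | none => exact absurd ((PySem.List.max?_eq_none_iff degs (fun x => x)).mp hmx) hne
    | some mx =>
    have hmx0 : 0 ≤ mx := hdnn mx (PySem.List.max?_mem hmx)
    have hmax : ∀ d ∈ degs, d ≤ mx := PySem.List.max?_isMax hmx
    set L : Nat := (mx + 1).toNat with hLdef
    have hLI : (L : Int) = mx + 1 := by omega
    have hbounds : ∀ d ∈ degs, 0 ≤ d ∧ d < ((List.replicate L (0:Int)).length : Int) := by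
      intro d hd
      refine ⟨hdnn d hd, ?_⟩
      have := hmax d hd
      simp [hLI]; omega
    obtain ⟨hclen, hcget⟩ := pv_counts degs (List.replicate L 0) hbounds
    set countsF : List Int :=
      degs.foldl (fun cs d => PySem.List.pySetD cs d (PySem.List.pyGetD cs d 0 + 1)) (List.replicate L 0)
      with hcF
    have hclen' : countsF.length = L := by simpa using hclen
    have hcval : ∀ v : Int, 0 ≤ v → v < (L : Int) →
        PySem.List.pyGetD countsF v 0 = (degs.count v : Int) := by
      intro v h0 hl
      rw [hcget v h0 (by simpa using hl), PySem.List.pyGetD_of_nonneg _ _ h0]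
      simp [List.getD]
    have hB : convert_adj_matrix_to_graph_seq_alt m
        = (PySem.List.pyRange ((L : Int) - 1) (-1) (-1)).flatMap
            (fun d => List.replicate (PySem.List.pyGetD countsF d 0).toNat d) := by
      simp only [convert_adj_matrix_to_graph_seq_alt]
      rw [← hdegs, if_neg hne, hmx, Option.getD_some, ← hLdef, ← hcF, hclen',
          PySem.List.foldl_append_eq_flatMap, List.nil_append]
    set R : List Int := PySem.List.pyRange ((L : Int) - 1) (-1) (-1) with hR
    have hR2 : R = (PySem.List.pyRange 0 (L : Int) 1).reverse := by
      rw [hR, PySem.List.pyRange_neg_one_eq_reverse]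
      norm_num
    have hRpw : R.Pairwise (· > ·) := by
      rw [hR2]
      exact List.pairwise_reverse.mpr (PySem.List.pairwise_lt_pyRange_one _ _)
    have hRnd : R.Nodup := hRpw.imp (fun h => ne_of_gt h)
    have hRmem : ∀ v : Int, v ∈ R ↔ 0 ≤ v ∧ v < (L : Int) := by
      intro v
      rw [hR, PySem.List.mem_pyRange_neg_one]
      omega
    set c : Int → Nat := fun d => (PySem.List.pyGetD countsF d 0).toNat with hc
    set ys : List Int := R.flatMap (fun d => List.replicate (c d) d) with hys
    have hcnt : ∀ v : Int, ys.count v = degs.count v := by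
      intro v
      rw [hys, pv_flatMap_count hRnd c v]
      by_cases hv : v ∈ R
      · obtain ⟨h0, hl⟩ := (hRmem v).mp hv
        rw [if_pos hv, hc]
        simp [hcval v h0 hl]
      · rw [if_neg hv]
        symm
        rw [List.count_eq_zero]
        intro hvd
        exact hv ((hRmem v).mpr ⟨hdnn v hvd, by simpa [hLI] using hmax v hvd⟩)
    have hperm : ys.Perm degs := List.perm_iff_count.mpr (by simpa using hcnt)
    have hpw : ys.Pairwise (fun a b => b ≤ a) := pv_flatMap_pairwise hRpw c
    have hsorted : PySem.List.sorted degs (fun x => x) false = ys.reverse :=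
      PySem.List.sorted_id_eq_of_perm_of_pairwise degs ys.reverse
        ((ys.reverse_perm).trans hperm) (List.pairwise_reverse.mpr hpw)
    rw [hA, hsorted, List.reverse_reverse, hB, hys, hc]

-- ===== VERDICT (by name: the statement is the Claim_ definition above) =====
theorem convert_adj_matrix_to_graph_seq_spec : Claim_equal_convert_adj_matrix_to_graph_seq := by
  intro m _
  unfold Spec_convert_adj_matrix_to_graph_seq
  exact pv_main m
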